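-- pv_equiv track=rewrite | github.com/srewoo/FortKnoxx | backend/scanners/compliance/syft_scanner.py | get_compliance_score
-- ===== SOURCE A (Python) =====
-- from typing import Dict, List, Optional
--
-- def get_compliance_score(findings: List[Dict]) -> int:
--     """Calculate license compliance score"""
--     if not findings:
--         return 100
--
--     deductions = 0
--     for finding in findings:
--         risk = finding.get("license_risk", "unknown")
--         if risk == "high":
--             deductions += 10
--         elif risk == "medium":
--             deductions += 5
--         elif risk == "unknown":
--             deductions += 2
--
--     return max(0, 100 - deductions)
-- ===== SOURCE B (Python) =====
-- def get_compliance_score(findings):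
--     """Calculate license compliance score"""
--     risks = [f.get("license_risk", "unknown") for f in findings]
--     deductions = (10 * risks.count("high")
--                   + 5 * risks.count("medium")
--                   + 2 * risks.count("unknown"))
--     return max(0, 100 - deductions)
-- ===== Notes on version B (the rewrite author's own statement) =====
-- stated objective: idiomatic
-- what changed: Replaces the explicit accumulator loop with branch chain by a map of the risk field followed by three list.count tallies combined in one weighted formula; the empty-list early return falls out naturally.
import Mathlib
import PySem

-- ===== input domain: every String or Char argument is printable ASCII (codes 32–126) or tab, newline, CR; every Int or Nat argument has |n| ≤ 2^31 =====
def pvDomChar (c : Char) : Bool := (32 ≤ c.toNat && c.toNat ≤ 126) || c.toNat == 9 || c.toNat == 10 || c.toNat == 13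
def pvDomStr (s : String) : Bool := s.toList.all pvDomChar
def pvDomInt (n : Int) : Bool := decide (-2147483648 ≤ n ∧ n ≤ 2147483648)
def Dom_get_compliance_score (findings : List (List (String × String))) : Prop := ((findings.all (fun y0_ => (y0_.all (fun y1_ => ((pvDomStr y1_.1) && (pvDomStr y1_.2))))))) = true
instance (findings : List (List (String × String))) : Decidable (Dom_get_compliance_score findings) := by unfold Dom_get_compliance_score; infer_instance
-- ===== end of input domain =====

-- B replaces the accumulator loop over findings by mapping out the risk fields and
-- combining three list.count tallies in one weighted formula (idiomatic; same cost).

-- ===== PORT A =====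
-- Port of A: early return for empty, then a fold accumulating deductions, then max-clamp.
def get_compliance_score (findings : List (List (String × String))) : Int :=
  if findings = [] then 100
  else
    let deductions := findings.foldl (fun acc f =>
      let risk := (PySem.Dict.mk f).getD "license_risk" "unknown"
      if risk = "high" then acc + 10
      else if risk = "medium" then acc + 5
      else if risk = "unknown" then acc + 2
      else acc) (0 : Int)
    max 0 (100 - deductions)

-- ===== PORT B =====
-- Port of B: map out the risk strings, tally with List.count, one weighted formula.
def get_compliance_score_alt (findings : List (List (String × String))) : Int :=
  let risks := findings.map (fun f => (PySem.Dict.mk f).getD "license_risk" "unknown")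
  max 0 (100 - (10 * (risks.count "high" : Int) + 5 * (risks.count "medium" : Int)
                + 2 * (risks.count "unknown" : Int)))

-- ===== PRECONDITION & SPEC =====
def Spec_get_compliance_score (findings : List (List (String × String))) (out : Int) : Prop := out = get_compliance_score_alt findings
instance (findings : List (List (String × String))) (out : Int) : Decidable (Spec_get_compliance_score findings out) := by unfold Spec_get_compliance_score; infer_instance

-- ===== CLAIM (what is proved, stated in full; the proofs are below) =====
def Claim_equal_get_compliance_score : Prop := ∀ (findings : List (List (String × String))), Dom_get_compliance_score findings → Spec_get_compliance_score findings (get_compliance_score findings)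

-- ===== LEMMAS AND PROOFS =====

-- ===== VERDICT (by name: the statement is the Claim_ definition above) =====
lemma deductions_eq (l : List (List (String × String))) (a : Int) :
    l.foldl (fun acc f =>
      let risk := (PySem.Dict.mk f).getD "license_risk" "unknown"
      if risk = "high" then acc + 10
      else if risk = "medium" then acc + 5
      else if risk = "unknown" then acc + 2
      else acc) a
    = a + (10 * ((l.map (fun f => (PySem.Dict.mk f).getD "license_risk" "unknown")).count "high" : Int)
         + 5 * ((l.map (fun f => (PySem.Dict.mk f).getD "license_risk" "unknown")).count "medium" : Int)
         + 2 * ((l.map (fun f => (PySem.Dict.mk f).getD "license_risk" "unknown")).count "unknown" : Int)) := by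
  induction l generalizing a with
  | nil => simp [List.foldl]
  | cons x xs ih =>
    simp only [List.foldl_cons, List.map_cons, List.count_cons, ih, beq_iff_eq]
    split_ifs <;> simp_all <;> omega

-- ===== VERDICT (by name: the statement is the Claim_ definition above) =====
theorem get_compliance_score_spec : Claim_equal_get_compliance_score := by
  intro findings _
  unfold Spec_get_compliance_score get_compliance_score get_compliance_score_alt
  by_cases h : findings = []
  · simp [h]
  · simp only [h, if_false, deductions_eq, zero_add]
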